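-- pv_equiv track=rewrite | github.com/jcolinpatrick/kryptos | scripts/grille/e_grille_19_tableau_mask.py | check_cribs
-- ===== SOURCE A (Python) =====
-- def check_cribs(text, label=""):
--     """Check if K4 cribs appear at any position in the text."""
--     hits = []
--     for word in ["EASTNORTHEAST", "BERLINCLOCK", "EAST", "NORTH", "BERLIN", "CLOCK",
--                  "THE", "AND", "WAS", "SLOWLY"]:
--         for i in range(len(text) - len(word) + 1):
--             if text[i:i + len(word)] == word:
--                 hits.append((word, i))
--     return hits
-- ===== SOURCE B (Python) =====
-- def check_cribs(text, label=""):
--     """Check if K4 cribs appear at any position in the text."""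
--     words = ["EASTNORTHEAST", "BERLINCLOCK", "EAST", "NORTH", "BERLIN", "CLOCK",
--              "THE", "AND", "WAS", "SLOWLY"]
--     lengths = []
--     for w in words:
--         if len(w) not in lengths:
--             lengths.append(len(w))
--     wset = set(words)
--     n = len(text)
--     found = []
--     for i in range(n):
--         for L in lengths:
--             if i + L <= n and text[i:i + L] in wset:
--                 found.append((text[i:i + L], i))
--     return [(w, i) for w in words for (w2, i) in found if w2 == w]
-- ===== Notes on version B (the rewrite author's own statement) =====
-- stated objective: alternative
-- what changed: Instead of scanning the whole text once per crib word (10 nested slice scans), B makes a single pass over the text positions, testing the slice for each of the 6 distinct crib lengths against a set of cribs, and regroups the collected hits per crib afterwards to reproduce A's word-major output order.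
import Mathlib
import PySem

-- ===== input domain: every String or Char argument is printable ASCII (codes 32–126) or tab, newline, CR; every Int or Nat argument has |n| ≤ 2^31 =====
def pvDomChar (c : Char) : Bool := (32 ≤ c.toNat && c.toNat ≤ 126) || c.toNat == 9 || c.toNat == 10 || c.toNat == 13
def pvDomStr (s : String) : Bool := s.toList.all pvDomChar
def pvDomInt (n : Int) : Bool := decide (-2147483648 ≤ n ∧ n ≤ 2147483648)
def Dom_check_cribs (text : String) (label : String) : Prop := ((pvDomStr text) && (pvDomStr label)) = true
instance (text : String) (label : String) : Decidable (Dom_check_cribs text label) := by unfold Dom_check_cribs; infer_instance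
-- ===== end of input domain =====

-- B replaces A's per-crib slice scan (one full pass of the text per crib) by a single pass over
-- the text positions with a set lookup per distinct crib length, regrouping hits per crib afterwards.

-- the fixed crib list, shared verbatim by both programs
def pvWords : List String := ["EASTNORTHEAST", "BERLINCLOCK", "EAST", "NORTH", "BERLIN", "CLOCK",
  "THE", "AND", "WAS", "SLOWLY"]

-- ===== PORT A =====
def check_cribs (text : String) (label : String) : List (String × Int) :=
  pvWords.foldl (fun hits word =>
    (PySem.List.pyRange 0 ((text.length : Int) - (word.length : Int) + 1) 1).foldl
      (fun hits i =>
        if PySem.Str.slice text (some i) (some (i + (word.length : Int))) == word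
        then hits ++ [(word, i)] else hits) hits) []

-- ===== PORT B =====
def check_cribs_alt (text : String) (label : String) : List (String × Int) :=
  let words := pvWords
  let lengths := words.foldl (fun acc w =>
    if (w.length : Int) ∈ acc then acc else acc ++ [(w.length : Int)]) ([] : List Int)
  let wset := PySem.Set.ofList words
  let n : Int := (text.length : Int)
  let found := (PySem.List.pyRange 0 n 1).foldl (fun acc i =>
    lengths.foldl (fun acc L =>
      if i + L ≤ n ∧ PySem.Str.slice text (some i) (some (i + L)) ∈ wset
      then acc ++ [(PySem.Str.slice text (some i) (some (i + L)), i)] else acc) acc) []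
  words.flatMap (fun w => (found.filter (fun p => p.1 == w)).map (fun p => (w, p.2)))

-- ===== PRECONDITION & SPEC =====
def Spec_check_cribs (text : String) (label : String) (out : List (String × Int)) : Prop := out = check_cribs_alt text label
instance (text : String) (label : String) (out : List (String × Int)) : Decidable (Spec_check_cribs text label out) := by unfold Spec_check_cribs; infer_instance

-- ===== CLAIM (what is proved, stated in full; the proofs are below) =====
def Claim_equal_check_cribs : Prop := ∀ (text : String) (label : String), Dom_check_cribs text label → Spec_check_cribs text label (check_cribs text label)

-- ===== LEMMAS AND PROOFS =====

-- the slice text[i:i+L] as a drop/take on the character list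
theorem pvSlice_toList (text : String) (i L : Int) (h0 : 0 ≤ i) (hL : 0 ≤ L) :
    (PySem.Str.slice text (some i) (some (i + L))).toList
      = (text.toList.drop i.toNat).take ((i + L).toNat - i.toNat) := by
  rw [PySem.Str.toList_slice]
  simp only [PySem.Chars.slice_eq_listSlice]
  rw [PySem.List.slice_toNat _ h0 (by omega)]

theorem pvSlice_length (text : String) (i L : Int) (h0 : 0 ≤ i) (hL : 0 ≤ L) :
    ((PySem.Str.slice text (some i) (some (i + L))).toList.length : Int)
      = min L ((text.length : Int) - i) ⊔ 0 := by
  rw [pvSlice_toList _ _ _ h0 hL]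
  simp [List.length_take, List.length_drop]
  omega

-- core predicate identity: at position i, the length-L slice equals crib w (and lies in the crib
-- set) iff L is w's length and A's per-word test at i succeeds (with the bound i+|w| ≤ n)
theorem pvPred_eq (text w : String) (hmem : w ∈ pvWords) (i L : Int)
    (h0 : 0 ≤ i) (hin : i ≤ (text.length : Int)) (hL : 0 ≤ L) :
    (decide (i + L ≤ (text.length : Int) ∧
        PySem.Str.slice text (some i) (some (i + L)) ∈ PySem.Set.ofList pvWords)
      && (PySem.Str.slice text (some i) (some (i + L)) == w))
    = ((L == (w.length : Int)) &&
       decide (i + (w.length : Int) ≤ (text.length : Int) ∧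
         PySem.Str.slice text (some i) (some (i + (w.length : Int))) = w)) := by
  by_cases hsl : PySem.Str.slice text (some i) (some (i + L)) = w
  · have hlen := pvSlice_length text i L h0 hL
    rw [hsl] at hlen
    rw [String.length_toList] at hlen
    by_cases hb : i + L ≤ (text.length : Int)
    · have hLw : L = (w.length : Int) := by omega
      simp [hsl, hb, hmem, ← hLw]
    · have hne : L ≠ (w.length : Int) := by omega
      rw [show (L == (w.length : Int)) = false from beq_eq_false_iff_ne.mpr hne]
      simp [hb]
  · by_cases hL' : L = (w.length : Int)
    · rw [← hL']
      simp [hsl]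
    · rw [show (L == (w.length : Int)) = false from beq_eq_false_iff_ne.mpr hL',
         show (PySem.Str.slice text (some i) (some (i + L)) == w) = false from
           beq_eq_false_iff_ne.mpr hsl]
      simp

-- restricting the full positional range by 'i + c ≤ n' gives A's per-word range
theorem pvRange_cut (text w : String) (c : Int) (hc : 1 ≤ c) :
    ((PySem.List.pyRange 0 (text.length : Int) 1).filter
        (fun i => decide (i + c ≤ (text.length : Int) ∧
          PySem.Str.slice text (some i) (some (i + c)) = w)))
    = ((PySem.List.pyRange 0 ((text.length : Int) - c + 1) 1).filter
        (fun i => PySem.Str.slice text (some i) (some (i + c)) == w)) := by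
  by_cases hn : (text.length : Int) < c
  · rw [show PySem.List.pyRange 0 ((text.length : Int) - c + 1) 1 = []
        from PySem.List.pyRange_one_eq_nil (by omega)]
    simp only [List.filter_nil]
    apply List.filter_eq_nil_iff.mpr
    intro i hi
    have := (PySem.List.mem_pyRange_one).mp hi
    simp only [decide_eq_true_eq, not_and]
    intro h
    omega
  · rw [PySem.List.pyRange_one_append 0 ((text.length : Int) - c + 1) (text.length : Int)
        (by omega) (by omega), List.filter_append]
    have h2 : ((PySem.List.pyRange ((text.length : Int) - c + 1) (text.length : Int) 1).filter
        (fun i => decide (i + c ≤ (text.length : Int) ∧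
          PySem.Str.slice text (some i) (some (i + c)) = w))) = [] := by
      apply List.filter_eq_nil_iff.mpr
      intro i hi
      have := (PySem.List.mem_pyRange_one).mp hi
      simp only [decide_eq_true_eq, not_and]
      intro h
      omega
    rw [h2, List.append_nil]
    apply List.filter_congr
    intro i hi
    have := (PySem.List.mem_pyRange_one).mp hi
    by_cases hsl : PySem.Str.slice text (some i) (some (i + c)) = w
    · simp [hsl]; omega
    · simp [hsl]

-- 'for i in l: if p(i): out.append(f(i))' as a flatMap of singletons
theorem pvFlatMap_if_singleton {α β : Type} (l : List α) (p : α → Bool) (f : α → β) :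
    l.flatMap (fun i => if p i then [f i] else []) = (l.filter p).map f := by
  induction l with
  | nil => simp
  | cons x t ih => by_cases h : p x <;> simp [h, ih]

theorem pvFilter_and_const {α : Type} (l : List α) (p : α → Bool) (b : Bool) :
    l.filter (fun x => p x && b) = if b then l.filter p else [] := by
  cases b <;> simp

-- B's regrouped bucket for one crib w equals A's scan for w
theorem pvPerWord (text w : String) (hmem : w ∈ pvWords) (hlen : 1 ≤ (w.length : Int))
    (hfilt : (([13, 11, 4, 5, 6, 3] : List Int).filter (fun L => L == (w.length : Int)))
      = [(w.length : Int)]) :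
    ((((PySem.List.pyRange 0 (text.length : Int) 1).flatMap (fun i =>
        (([13, 11, 4, 5, 6, 3] : List Int).filter (fun L =>
          decide (i + L ≤ (text.length : Int) ∧
            PySem.Str.slice text (some i) (some (i + L)) ∈ PySem.Set.ofList pvWords))).map
          (fun L => (PySem.Str.slice text (some i) (some (i + L)), i)))).filter
        (fun p => p.1 == w)).map (fun p => (w, p.2)))
    = (((PySem.List.pyRange 0 ((text.length : Int) - (w.length : Int) + 1) 1).filter
        (fun i => PySem.Str.slice text (some i) (some (i + (w.length : Int))) == w)).map
        (fun i => (w, i))) := by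
  rw [List.filter_flatMap, List.map_flatMap]
  have step : ∀ i ∈ PySem.List.pyRange 0 (text.length : Int) 1,
      (List.map (fun p => (w, p.2))
        (List.filter (fun p => p.1 == w)
          ((([13, 11, 4, 5, 6, 3] : List Int).filter (fun L =>
            decide (i + L ≤ (text.length : Int) ∧
              PySem.Str.slice text (some i) (some (i + L)) ∈ PySem.Set.ofList pvWords))).map
            (fun L => (PySem.Str.slice text (some i) (some (i + L)), i)))))
      = (if decide (i + (w.length : Int) ≤ (text.length : Int) ∧
            PySem.Str.slice text (some i) (some (i + (w.length : Int))) = w)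
         then [(w, i)] else []) := by
    intro i hi
    have hib := (PySem.List.mem_pyRange_one).mp hi
    rw [List.filter_map, List.filter_filter]
    have hpred : ∀ L ∈ ([13, 11, 4, 5, 6, 3] : List Int),
        (((fun p => p.1 == w) ∘ (fun L => (PySem.Str.slice text (some i) (some (i + L)), i))) L &&
          (fun L => decide (i + L ≤ (text.length : Int) ∧
            PySem.Str.slice text (some i) (some (i + L)) ∈ PySem.Set.ofList pvWords)) L)
        = ((fun L => L == (w.length : Int)) L &&
           decide (i + (w.length : Int) ≤ (text.length : Int) ∧
             PySem.Str.slice text (some i) (some (i + (w.length : Int))) = w)) := by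
      intro L hL
      have hL0 : (0:Int) ≤ L := by fin_cases hL <;> norm_num
      rw [Bool.and_comm]
      exact pvPred_eq text w hmem i L hib.1 (by omega) hL0
    rw [List.filter_congr hpred, pvFilter_and_const, hfilt]
    by_cases hP : (i + (w.length : Int) ≤ (text.length : Int) ∧
        PySem.Str.slice text (some i) (some (i + (w.length : Int))) = w)
    · simp [hP]
    · simp [hP]
  rw [List.flatMap_congr step, pvFlatMap_if_singleton, pvRange_cut text w _ hlen]

theorem check_cribs_eq (text label : String) : check_cribs text label = check_cribs_alt text label := by
  unfold check_cribs check_cribs_alt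
  simp only [PySem.List.foldl_append_if, PySem.List.foldl_append_ite,
    PySem.List.foldl_append_eq_flatMap, List.nil_append]
  rw [show (pvWords.foldl (fun acc w =>
    if (w.length : Int) ∈ acc then acc else acc ++ [(w.length : Int)]) ([] : List Int))
    = ([13, 11, 4, 5, 6, 3] : List Int) from by decide]
  symm
  apply List.flatMap_congr
  intro w hw
  fin_cases hw <;>
    exact pvPerWord text _ (by decide) (by decide) (by decide)

-- ===== VERDICT (by name: the statement is the Claim_ definition above) =====
theorem check_cribs_spec : Claim_equal_check_cribs := by
  intro text label _
  exact check_cribs_eq text label
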